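-- pv_equiv track=rewrite | github.com/baiwan-chenhao/rewrite | leetcode_gen_week4.py | solve
-- ===== SOURCE A (Python) =====
-- from math import inf, lcm
-- from typing import List, Tuple
--
-- def solve(nums: List[int]) -> int:
--     from math import gcd
--     n = len(nums)
--     suf_gcd = [0] * (n + 1)
--     suf_lcm = [0] * n + [1]
--     for i in range(n - 1, -1, -1):
--         suf_gcd[i] = gcd(suf_gcd[i + 1], nums[i])
--         suf_lcm[i] = lcm(suf_lcm[i + 1], nums[i])
--
--     ans = suf_gcd[0] * suf_lcm[0]  # 不移除元素
--     pre_gcd, pre_lcm = 0, 1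
--     for i, x in enumerate(nums):  # 枚举移除 nums[i]
--         ans = max(ans, gcd(pre_gcd, suf_gcd[i + 1]) * lcm(pre_lcm, suf_lcm[i + 1]))
--         pre_gcd = gcd(pre_gcd, x)
--         pre_lcm = lcm(pre_lcm, x)
--     return ans
-- ===== SOURCE B (Python) =====
-- from math import gcd, lcm
-- from functools import reduce
-- from typing import List
--
-- def solve(nums: List[int]) -> int:
--     best = reduce(gcd, nums, 0) * reduce(lcm, nums, 1)
--     for k in range(len(nums)):
--         rest = nums[:k] + nums[k + 1:]
--         best = max(best, reduce(gcd, rest, 0) * reduce(lcm, rest, 1))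
--     return best
-- ===== Notes on version B (the rewrite author's own statement) =====
-- stated objective: simpler
-- what changed: Replaces the prefix/suffix gcd-lcm array machinery with a direct rescan: for each candidate removal the gcd and lcm of the remaining elements are recomputed with reduce, trading O(n) for O(n^2) but far plainer code.
import Mathlib
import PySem

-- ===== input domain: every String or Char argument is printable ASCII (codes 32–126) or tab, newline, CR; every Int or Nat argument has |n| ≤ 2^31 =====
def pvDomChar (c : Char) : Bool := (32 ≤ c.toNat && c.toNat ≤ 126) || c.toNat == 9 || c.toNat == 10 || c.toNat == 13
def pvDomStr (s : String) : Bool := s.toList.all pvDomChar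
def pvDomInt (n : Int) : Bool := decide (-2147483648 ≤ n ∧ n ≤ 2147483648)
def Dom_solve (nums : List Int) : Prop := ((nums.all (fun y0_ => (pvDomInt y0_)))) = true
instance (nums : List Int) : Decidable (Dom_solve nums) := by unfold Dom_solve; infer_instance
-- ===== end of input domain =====

-- B replaces A's prefix/suffix gcd-lcm arrays with a plain rescan per removal candidate (simpler, O(n^2) vs O(n)); return value only, neither mutates its argument.

-- math.gcd / math.lcm on two ints: nonnegative gcd/lcm of absolute values (exact)
def gcdI (a b : Int) : Int := (Int.gcd a b : Int)
def lcmI (a b : Int) : Int := (Int.lcm a b : Int)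

-- ===== PORT A =====
-- the Python loop fills suf[i] = f(suf[i+1], nums[i]) for i = n-1 .. 0; this recursion
-- builds the same array right to left, each new head computed from the previous head
def sufBuild (f : Int → Int → Int) (base : Int) : List Int → List Int
  | [] => [base]
  | x :: t =>
      let r := sufBuild f base t
      f (r.getD 0 base) x :: r

def solve (nums : List Int) : Int :=
  let sufg := sufBuild gcdI 0 nums
  let sufl := sufBuild lcmI 1 nums
  let ans0 := sufg.getD 0 0 * sufl.getD 0 1   -- 不移除元素
  ((PySem.List.enumerate nums).foldl
    (fun (st : Int × Int × Int) ix =>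
      let ans := max st.1 (gcdI st.2.1 (sufg.getD (ix.1 + 1).toNat 0) *
                           lcmI st.2.2 (sufl.getD (ix.1 + 1).toNat 1))
      (ans, gcdI st.2.1 ix.2, lcmI st.2.2 ix.2))
    (ans0, 0, 1)).1

-- ===== PORT B =====
-- reduce(gcd, xs, 0) and reduce(lcm, xs, 1)
def foldGcd (xs : List Int) : Int := xs.foldl gcdI 0
def foldLcm (xs : List Int) : Int := xs.foldl lcmI 1

def solve_alt (nums : List Int) : Int :=
  (List.range nums.length).foldl
    (fun best k =>
      let rest := nums.take k ++ nums.drop (k + 1)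
      max best (foldGcd rest * foldLcm rest))
    (foldGcd nums * foldLcm nums)

-- ===== PRECONDITION & SPEC =====
def Spec_solve (nums : List Int) (out : Int) : Prop := out = solve_alt nums
instance (nums : List Int) (out : Int) : Decidable (Spec_solve nums out) := by unfold Spec_solve; infer_instance

-- ===== CLAIM (what is proved, stated in full; the proofs are below) =====
def Claim_equal_solve : Prop := ∀ (nums : List Int), Dom_solve nums → Spec_solve nums (solve nums)

-- ===== LEMMAS AND PROOFS =====

theorem gcdI_nonneg (a b : Int) : 0 ≤ gcdI a b := Int.natCast_nonneg _
theorem lcmI_nonneg (a b : Int) : 0 ≤ lcmI a b := Int.natCast_nonneg _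

theorem gcdI_comm (a b : Int) : gcdI a b = gcdI b a := by
  simp [gcdI, Int.gcd, Nat.gcd_comm]

theorem lcmI_comm (a b : Int) : lcmI a b = lcmI b a := by
  simp [lcmI, Int.lcm, Nat.lcm_comm]

theorem gcdI_assoc (a b c : Int) : gcdI (gcdI a b) c = gcdI a (gcdI b c) := by
  simp [gcdI, Int.gcd, Nat.gcd_assoc]

theorem lcmI_assoc (a b c : Int) : lcmI (lcmI a b) c = lcmI a (lcmI b c) := by
  simp [lcmI, Int.lcm, Nat.lcm_assoc]

theorem gcdI_base (x y : Int) : gcdI (gcdI 0 x) y = gcdI x y := by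
  simp [gcdI, Int.gcd, Int.natAbs_abs]

theorem lcmI_base (x y : Int) : lcmI (lcmI 1 x) y = lcmI x y := by
  simp [lcmI, Int.lcm, Int.natAbs_abs]

theorem gcdI_id (a : Int) (h : 0 ≤ a) : gcdI a 0 = a := by
  simp [gcdI, Int.gcd]; omega

theorem lcmI_id (a : Int) (h : 0 ≤ a) : lcmI a 1 = a := by
  simp [lcmI, Int.lcm]; omega

-- fold pulls out of a nonnegative accumulator
theorem foldl_f_split (f : Int → Int → Int) (base : Int)
    (hassoc : ∀ a b c, f (f a b) c = f a (f b c))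
    (hbase : ∀ x y, f (f base x) y = f x y)
    (hnn : ∀ a b, 0 ≤ f a b)
    (hid : ∀ a, 0 ≤ a → f a base = a) :
    ∀ (xs : List Int) (a : Int), 0 ≤ a → xs.foldl f a = f a (xs.foldl f base) := by
  intro xs
  induction xs with
  | nil => intro a ha; simp [hid a ha]
  | cons x t ih =>
      intro a ha
      simp only [List.foldl_cons]
      rw [ih (f a x) (hnn a x), ih (f base x) (hnn base x), hbase, hassoc]

theorem foldGcd_split (xs : List Int) (a : Int) (ha : 0 ≤ a) :
    xs.foldl gcdI a = gcdI a (foldGcd xs) :=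
  foldl_f_split gcdI 0 gcdI_assoc gcdI_base gcdI_nonneg gcdI_id xs a ha

theorem foldLcm_split (xs : List Int) (a : Int) (ha : 0 ≤ a) :
    xs.foldl lcmI a = lcmI a (foldLcm xs) :=
  foldl_f_split lcmI 1 lcmI_assoc lcmI_base lcmI_nonneg lcmI_id xs a ha

theorem foldGcd_nonneg (xs : List Int) : 0 ≤ foldGcd xs := by
  cases xs with
  | nil => simp [foldGcd]
  | cons x t =>
      simp only [foldGcd, List.foldl_cons]
      rw [foldGcd_split t _ (gcdI_nonneg 0 x)]; exact gcdI_nonneg _ _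

theorem foldLcm_nonneg (xs : List Int) : 0 ≤ foldLcm xs := by
  cases xs with
  | nil => simp [foldLcm]
  | cons x t =>
      simp only [foldLcm, List.foldl_cons]
      rw [foldLcm_split t _ (lcmI_nonneg 1 x)]; exact lcmI_nonneg _ _

theorem foldGcd_append (xs ys : List Int) :
    foldGcd (xs ++ ys) = gcdI (foldGcd xs) (foldGcd ys) := by
  simp only [foldGcd, List.foldl_append]
  exact foldGcd_split ys _ (foldGcd_nonneg xs)

theorem foldLcm_append (xs ys : List Int) :
    foldLcm (xs ++ ys) = lcmI (foldLcm xs) (foldLcm ys) := by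
  simp only [foldLcm, List.foldl_append]
  exact foldLcm_split ys _ (foldLcm_nonneg xs)

theorem foldGcd_cons (x : Int) (t : List Int) :
    foldGcd (x :: t) = gcdI (foldGcd t) x := by
  simp only [foldGcd, List.foldl_cons]
  rw [foldGcd_split t _ (gcdI_nonneg 0 x), gcdI_comm _ (foldGcd t)]
  rw [show gcdI 0 x = gcdI x 0 from gcdI_comm 0 x]
  rw [show gcdI (foldGcd t) (gcdI x 0) = gcdI (gcdI (foldGcd t) x) 0 from (gcdI_assoc _ _ _).symm]
  exact gcdI_id _ (gcdI_nonneg _ _)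

theorem foldLcm_cons (x : Int) (t : List Int) :
    foldLcm (x :: t) = lcmI (foldLcm t) x := by
  simp only [foldLcm, List.foldl_cons]
  rw [foldLcm_split t _ (lcmI_nonneg 1 x), lcmI_comm _ (foldLcm t)]
  rw [show lcmI 1 x = lcmI x 1 from lcmI_comm 1 x]
  rw [show lcmI (foldLcm t) (lcmI x 1) = lcmI (lcmI (foldLcm t) x) 1 from (lcmI_assoc _ _ _).symm]
  exact lcmI_id _ (lcmI_nonneg _ _)

theorem sufBuild_gcd_getD (xs : List Int) :
    ∀ j, j ≤ xs.length → (sufBuild gcdI 0 xs).getD j 0 = foldGcd (xs.drop j) := by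
  induction xs with
  | nil =>
      intro j hj
      have hj0 : j = 0 := by simpa using hj
      subst hj0; simp [sufBuild, foldGcd]
  | cons x t ih =>
      intro j hj
      cases j with
      | zero =>
          have h0 := ih 0 (Nat.zero_le _)
          simp only [sufBuild, List.getD, List.getElem?_cons_zero, Option.getD_some, List.drop_zero] at *
          rw [h0, foldGcd_cons]
      | succ j' =>
          simp only [sufBuild, List.getD, List.getElem?_cons_succ, List.drop_succ_cons]
          exact ih j' (Nat.le_of_succ_le_succ hj)

theorem sufBuild_lcm_getD (xs : List Int) :
    ∀ j, j ≤ xs.length → (sufBuild lcmI 1 xs).getD j 1 = foldLcm (xs.drop j) := by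
  induction xs with
  | nil =>
      intro j hj
      have hj0 : j = 0 := by simpa using hj
      subst hj0; simp [sufBuild, foldLcm]
  | cons x t ih =>
      intro j hj
      cases j with
      | zero =>
          have h0 := ih 0 (Nat.zero_le _)
          simp only [sufBuild, List.getD, List.getElem?_cons_zero, Option.getD_some, List.drop_zero] at *
          rw [h0, foldLcm_cons]
      | succ j' =>
          simp only [sufBuild, List.getD, List.getElem?_cons_succ, List.drop_succ_cons]
          exact ih j' (Nat.le_of_succ_le_succ hj)

-- the candidate value for removing index k, as B computes it
def cand (nums : List Int) (k : Nat) : Int :=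
  foldGcd (nums.take k ++ nums.drop (k + 1)) * foldLcm (nums.take k ++ nums.drop (k + 1))

theorem cand_eq (nums : List Int) (k : Nat) :
    cand nums k = gcdI (foldGcd (nums.take k)) (foldGcd (nums.drop (k + 1))) *
                  lcmI (foldLcm (nums.take k)) (foldLcm (nums.drop (k + 1))) := by
  simp [cand, foldGcd_append, foldLcm_append]

-- A's main loop, viewed from a split point k, equals the max-fold of B's candidates
theorem loop_eq (nums : List Int) :
    ∀ (rest : List Int) (k : Nat) (ans : Int),
      nums.drop k = rest →
      ((PySem.List.enumerate rest (k : Int)).foldl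
        (fun (st : Int × Int × Int) ix =>
          let a := max st.1 (gcdI st.2.1 ((sufBuild gcdI 0 nums).getD (ix.1 + 1).toNat 0) *
                             lcmI st.2.2 ((sufBuild lcmI 1 nums).getD (ix.1 + 1).toNat 1))
          (a, gcdI st.2.1 ix.2, lcmI st.2.2 ix.2))
        (ans, foldGcd (nums.take k), foldLcm (nums.take k))).1
      = (List.range' k rest.length).foldl (fun b j => max b (cand nums j)) ans := by
  intro rest
  induction rest with
  | nil => intro k ans _; simp [PySem.List.enumerate]
  | cons x t ih =>
      intro k ans hdrop
      have hk : k < nums.length := by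
        by_contra h
        have : nums.drop k = [] := List.drop_eq_nil_of_le (by omega)
        rw [hdrop] at this; exact absurd this (by simp)
      have hx : nums[k]? = some x := by
        have h : (nums.drop k)[0]? = nums[k + 0]? := List.getElem?_drop
        rw [hdrop] at h; simpa using h.symm
      have htake : nums.take (k + 1) = nums.take k ++ [x] := by
        rw [List.take_add_one, hx]; rfl
      have hdrop' : nums.drop (k + 1) = t := by
        have : nums.drop (k + 1) = (nums.drop k).drop 1 := by
          rw [List.drop_drop]
        rw [this, hdrop]; simp
      rw [PySem.List.enumerate_cons]
      simp only [List.foldl_cons, List.length_cons, List.range'_succ]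
      have htoNat : ((k : Int) + 1).toNat = k + 1 := by omega
      rw [htoNat]
      rw [sufBuild_gcd_getD nums (k + 1) (by omega), sufBuild_lcm_getD nums (k + 1) (by omega)]
      have hstep :
          gcdI (foldGcd (nums.take k)) x = foldGcd (nums.take (k + 1)) := by
        rw [htake, foldGcd_append, show foldGcd [x] = gcdI 0 x from rfl,
            gcdI_comm 0 x, ← gcdI_assoc]
        exact (gcdI_id _ (gcdI_nonneg _ _)).symm
      have hstepl :
          lcmI (foldLcm (nums.take k)) x = foldLcm (nums.take (k + 1)) := by
        rw [htake, foldLcm_append, show foldLcm [x] = lcmI 1 x from rfl,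
            lcmI_comm 1 x, ← lcmI_assoc]
        exact (lcmI_id _ (lcmI_nonneg _ _)).symm
      have hcast : (k : Int) + 1 = ((k + 1 : Nat) : Int) := by push_cast; ring
      rw [hstep, hstepl, hcast]
      rw [ih (k + 1) _ hdrop']
      rw [cand_eq]

theorem solve_eq (nums : List Int) : solve nums = solve_alt nums := by
  have h0g := sufBuild_gcd_getD nums 0 (Nat.zero_le _)
  have h0l := sufBuild_lcm_getD nums 0 (Nat.zero_le _)
  simp only [List.drop_zero] at h0g h0l
  have hloop := loop_eq nums nums 0
      ((sufBuild gcdI 0 nums).getD 0 0 * (sufBuild lcmI 1 nums).getD 0 1) (by simp)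
  simp only [Nat.cast_zero, List.take_zero,
    show foldGcd [] = 0 from rfl, show foldLcm [] = 1 from rfl] at hloop
  simp only [solve, solve_alt]
  rw [List.range_eq_range', hloop, h0g, h0l]
  simp only [cand]

-- ===== VERDICT (by name: the statement is the Claim_ definition above) =====
theorem solve_spec : Claim_equal_solve := by
  intro nums _
  unfold Spec_solve
  exact solve_eq nums
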